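-- pv_equiv track=rewrite | github.com/clubalgoritmos/CompetitiveProgramming | H_Harmonics_with_Interference.py | find_valid_message
-- ===== SOURCE A (Python) =====
-- def generate_combinations(s):
--     if '*' not in s:
--         return [s]
--     combinations = []
--     for c in '01':
--         combinations.extend(generate_combinations(s.replace('*', c, 1)))
--     return combinations
--
-- def find_valid_message(M_prime, N_prime):
--     M_combinations = generate_combinations(M_prime)
--     N_combinations = generate_combinations(N_prime)
--
--     for M in M_combinations:
--         M_int = int(M, 2)
--         for N in N_combinations:
--             N_int = int(N, 2)
--             if N_int != 0 and M_int % N_int == 0: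
--                 return M
--     return None
-- ===== SOURCE B (Python) =====
-- def find_valid_message(M_prime, N_prime):
--     def expand(s):
--         k = s.count('*')
--         out = []
--         for mask in range(1 << k):
--             j = k - 1
--             chars = []
--             for ch in s:
--                 if ch == '*':
--                     chars.append('01'[(mask >> j) & 1])
--                     j -= 1
--                 else:
--                     chars.append(ch)
--             out.append(''.join(chars))
--         return out
--
--     M_combinations = expand(M_prime)
--     N_ints = [int(N, 2) for N in expand(N_prime)]
--     for M in M_combinations:
--         M_int = int(M, 2)
--         if any(n != 0 and M_int % n == 0 for n in N_ints):
--             return M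
--     return None
-- ===== Notes on version B (the rewrite author's own statement) =====
-- stated objective: alternative
-- what changed: The recursive replace-first-'*' expansion is replaced by positional enumeration: B counts the stars and enumerates integer bitmasks 0..2^k-1, substituting the mask's bits (MSB first) at the star positions, and it parses the N expansions once up front instead of re-parsing them for every M.
-- outside the precondition, e.g. on find_valid_message(' 0_1', '*B00*'): A returns ' 0_1', B raises ValueError; on find_valid_message('*b1', '1'): A returns '0b1', B returns '0b1'
import Mathlib
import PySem

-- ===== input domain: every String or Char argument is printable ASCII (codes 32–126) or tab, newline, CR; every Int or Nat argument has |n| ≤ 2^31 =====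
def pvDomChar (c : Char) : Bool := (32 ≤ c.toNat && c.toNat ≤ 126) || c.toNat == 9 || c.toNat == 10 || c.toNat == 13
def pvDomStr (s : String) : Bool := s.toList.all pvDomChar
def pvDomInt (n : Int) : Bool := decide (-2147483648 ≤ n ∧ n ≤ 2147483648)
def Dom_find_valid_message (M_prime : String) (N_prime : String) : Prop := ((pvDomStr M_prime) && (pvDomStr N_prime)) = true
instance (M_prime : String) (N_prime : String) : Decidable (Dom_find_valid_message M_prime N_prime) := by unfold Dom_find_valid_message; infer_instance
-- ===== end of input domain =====

-- B replaces the recursive replace-first-'*' expansion by enumerating integer bitmasks over the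
-- star positions, and parses the N expansions once up front; equivalence is proved on Pre_ below.

-- ---- shared helper: a step-for-step port of Python's int(s, 2) (ValueError = none).
-- Exact on the ASCII domain: strip whitespace, optional sign, optional 0b/0B prefix
-- (an '_' may follow the prefix), binary digits with single '_' separators between digits.
def pvIsSpace (c : Char) : Bool := c = ' ' || c = '\t' || c = '\n' || c = '\r' || c = '\x0b' || c = '\x0c'
def pvStrip (l : List Char) : List Char := ((l.dropWhile pvIsSpace).reverse.dropWhile pvIsSpace).reverse
def pvDval (c : Char) : Option Int := if c = '0' then some 0 else if c = '1' then some 1 else none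
def pvRun : List Char → Int → Option Int
  | [], acc => some acc
  | c :: cs, acc =>
    if c = '_' then
      match cs with
      | c' :: cs' => match pvDval c' with
        | some d => pvRun cs' (2 * acc + d)
        | none => none
      | [] => none
    else match pvDval c with
      | some d => pvRun cs (2 * acc + d)
      | none => none
def pvDigits : List Char → Option Int
  | [] => none
  | c :: cs => match pvDval c with
    | some d => pvRun cs d
    | none => none
def pvBodyPref : List Char → Option Int
  | [] => pvDigits []
  | a :: r => if a = '_' then pvDigits r else pvDigits (a :: r)
def pvBody (l : List Char) : Option Int :=
  match l with
  | a :: b :: _ => if a = '0' ∧ (b = 'b' ∨ b = 'B') then pvBodyPref (l.drop 2) else pvDigits l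
  | _ => pvDigits l
def pvSigned (l : List Char) : Option Int :=
  match l with
  | a :: r => if a = '+' then pvBody r else if a = '-' then (pvBody r).map (fun x => -x) else pvBody l
  | [] => pvBody []
def pvInt2 (l : List Char) : Option Int := pvSigned (pvStrip l)

-- ===== PORT A =====
def pvReplaceFirst : List Char → Char → List Char   -- s.replace('*', c, 1)
  | [], _ => []
  | c :: t, r => if c = '*' then r :: t else c :: pvReplaceFirst t r

theorem pvCount_replaceFirst (l : List Char) (r : Char) (h : '*' ∈ l) (hr : r ≠ '*') :
    (pvReplaceFirst l r).count '*' = l.count '*' - 1 := by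
  induction l with
  | nil => cases h
  | cons c t ih =>
    by_cases hc : c = '*'
    · subst hc; simp [pvReplaceFirst, hr]
    · have ht : '*' ∈ t := by cases h with
        | head => exact absurd rfl hc
        | tail _ h => exact h
      have hpos : 0 < t.count '*' := List.count_pos_iff.mpr ht
      simp only [pvReplaceFirst, if_neg hc, List.count_cons, ih ht]
      omega

theorem pvCount_replaceFirst_lt (l : List Char) (r : Char) (h : '*' ∈ l) (hr : r ≠ '*') :
    (pvReplaceFirst l r).count '*' < l.count '*' := by
  have := pvCount_replaceFirst l r h hr
  have hpos : 0 < l.count '*' := List.count_pos_iff.mpr h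
  omega

def generate_combinations (l : List Char) : List (List Char) :=
  if h : '*' ∈ l then
    generate_combinations (pvReplaceFirst l '0') ++ generate_combinations (pvReplaceFirst l '1')
  else [l]
termination_by l.count '*'
decreasing_by
  · exact pvCount_replaceFirst_lt l '0' h (by decide)
  · exact pvCount_replaceFirst_lt l '1' h (by decide)

def pvInnerA (m : Int) : List (List Char) → Option Bool
  | [] => some false
  | N :: rest =>
    match pvInt2 N with
    | none => none    -- int(N, 2) raises: excluded by Pre_
    | some n => if ¬ n = 0 ∧ PySem.Int.mod m n = 0 then some true else pvInnerA m rest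
def pvSearchA : List (List Char) → List (List Char) → Option String
  | [], _ => none
  | M :: rest, Ns =>
    match pvInt2 M with
    | none => none    -- int(M, 2) raises: excluded by Pre_
    | some m =>
      match pvInnerA m Ns with
      | none => none
      | some true => some (String.ofList M)
      | some false => pvSearchA rest Ns

def find_valid_message (M_prime : String) (N_prime : String) : Option String :=
  pvSearchA (generate_combinations M_prime.toList) (generate_combinations N_prime.toList)

-- ===== PORT B =====
-- '01'[(mask >> j) & 1] substituted at each '*', j counting down from k-1 (Python's j may end
-- at -1 unused; the Nat truncation after the last star is likewise unused).
def pvFillMask : List Char → Nat → Nat → List Char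
  | [], _, _ => []
  | c :: t, mask, j =>
    if c = '*' then (if (mask >>> j) &&& 1 = 1 then '1' else '0') :: pvFillMask t mask (j - 1)
    else c :: pvFillMask t mask j

def pvExpand (l : List Char) : List (List Char) :=   -- for mask in range(1 << k)
  (List.range (2 ^ l.count '*')).map (fun mask => pvFillMask l mask (l.count '*' - 1))

def pvAnyDiv (m : Int) : List (Option Int) → Bool
  | [] => false
  | o :: rest =>
    (match o with
     | some n => decide (¬ n = 0 ∧ PySem.Int.mod m n = 0)
     | none => false) || pvAnyDiv m rest
def pvSearchB : List (List Char) → List (Option Int) → Option String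
  | [], _ => none
  | M :: rest, ns =>
    match pvInt2 M with
    | none => none    -- int(M, 2) raises: excluded by Pre_
    | some m => if pvAnyDiv m ns then some (String.ofList M) else pvSearchB rest ns

def find_valid_message_alt (M_prime : String) (N_prime : String) : Option String :=
  pvSearchB (pvExpand M_prime.toList) ((pvExpand N_prime.toList).map pvInt2)

-- ===== PRECONDITION & SPEC =====
-- Checker mirroring int(s,2)'s literal grammar with '*' accepted as a binary digit: Pre_ admits
-- exactly the patterns every expansion of which int(·,2) accepts.  It excludes (a) inputs where
-- int raises ValueError on the first expansion reached (A raises there), and (b) the degenerate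
-- patterns with '*' inside the sign/'0b'-prefix positions, where only some expansions parse:
-- there A's lazy parsing can return before reaching an invalid expansion while B's up-front
-- parse of the N expansions raises ValueError.
def pvDok (c : Char) : Bool := c = '0' || c = '1' || c = '*'
def pvRunOk : List Char → Bool
  | [] => true
  | c :: cs =>
    if c = '_' then
      match cs with
      | c' :: cs' => pvDok c' && pvRunOk cs'
      | [] => false
    else pvDok c && pvRunOk cs
def pvDigitsOk : List Char → Bool
  | [] => false
  | c :: cs => pvDok c && pvRunOk cs
def pvBodyPrefOk : List Char → Bool
  | [] => false
  | a :: r => if a = '_' then pvDigitsOk r else pvDigitsOk (a :: r)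
def pvBodyOk (l : List Char) : Bool :=
  match l with
  | a :: b :: _ => if a = '0' ∧ (b = 'b' ∨ b = 'B') then pvBodyPrefOk (l.drop 2) else pvDigitsOk l
  | _ => pvDigitsOk l
def pvSignedOk (l : List Char) : Bool :=
  match l with
  | a :: r => if a = '+' then pvBodyOk r else if a = '-' then pvBodyOk r else pvBodyOk l
  | [] => pvBodyOk []

def Pre_find_valid_message (M_prime : String) (N_prime : String) : Prop :=
  pvSignedOk (pvStrip M_prime.toList) = true ∧ pvSignedOk (pvStrip N_prime.toList) = true
instance (M_prime : String) (N_prime : String) : Decidable (Pre_find_valid_message M_prime N_prime) := by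
  unfold Pre_find_valid_message; infer_instance

def pvWitness_find_valid_message : String × String := ("1*0", "1*")

def Spec_find_valid_message (M_prime : String) (N_prime : String) (out : Option String) : Prop := out = find_valid_message_alt M_prime N_prime
instance (M_prime : String) (N_prime : String) (out : Option String) : Decidable (Spec_find_valid_message M_prime N_prime out) := by unfold Spec_find_valid_message; infer_instance

-- ===== CLAIM (what is proved, stated in full; the proofs are below) =====
def Claim_equal_find_valid_message : Prop := ∀ (M_prime : String) (N_prime : String), Dom_find_valid_message M_prime N_prime → Pre_find_valid_message M_prime N_prime → Spec_find_valid_message M_prime N_prime (find_valid_message M_prime N_prime)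

-- ===== LEMMAS AND PROOFS =====

-- Canonical description of both expansions: the bit strings of length k in lexicographic
-- order, substituted left-to-right at the '*' positions.
def pvProds : Nat → List (List Char)
  | 0 => [[]]
  | n + 1 => (pvProds n).map (fun bs => '0' :: bs) ++ (pvProds n).map (fun bs => '1' :: bs)

def pvFill : List Char → List Char → List Char
  | [], _ => []
  | c :: t, bs =>
    if c = '*' then
      match bs with
      | b :: bs' => b :: pvFill t bs'
      | [] => c :: pvFill t []
    else c :: pvFill t bs

theorem pvFill_nostar (l : List Char) (bs : List Char) (h : ¬ '*' ∈ l) : pvFill l bs = l := by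
  induction l generalizing bs with
  | nil => rfl
  | cons c t ih =>
    have hc : ¬ c = '*' := fun hc => h (hc ▸ List.mem_cons_self ..)
    simp [pvFill, hc, ih _ (fun ht => h (List.mem_cons_of_mem _ ht))]

theorem pvFill_replaceFirst (l : List Char) (b : Char) (bs : List Char)
    (h : '*' ∈ l) (hb : b ≠ '*') :
    pvFill l (b :: bs) = pvFill (pvReplaceFirst l b) bs := by
  induction l generalizing bs with
  | nil => cases h
  | cons c t ih =>
    by_cases hc : c = '*'
    · subst hc; simp [pvFill, pvReplaceFirst, hb]
    · have ht : '*' ∈ t := by cases h with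
        | head => exact absurd rfl hc
        | tail _ h => exact h
      simp [pvFill, pvReplaceFirst, hc, ih bs ht]

theorem generate_combinations_eq (l : List Char) :
    generate_combinations l = (pvProds (l.count '*')).map (pvFill l) := by
  by_cases h : '*' ∈ l
  · have h0 := pvCount_replaceFirst l '0' h (by decide)
    have h1 := pvCount_replaceFirst l '1' h (by decide)
    have hpos : 0 < l.count '*' := List.count_pos_iff.mpr h
    obtain ⟨k, hk⟩ : ∃ k, l.count '*' = k + 1 := ⟨l.count '*' - 1, by omega⟩
    rw [generate_combinations, dif_pos h,
      generate_combinations_eq (pvReplaceFirst l '0'),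
      generate_combinations_eq (pvReplaceFirst l '1'), h0, h1, hk]
    simp only [Nat.add_sub_cancel, pvProds, List.map_append, List.map_map]
    congr 1 <;> {
      apply List.map_congr_left
      intro bs _
      simp only [Function.comp_apply]
      rw [pvFill_replaceFirst l _ bs h (by decide)] }
  · simp [generate_combinations, h, List.count_eq_zero_of_not_mem h, pvProds,
      pvFill_nostar l [] h]
termination_by l.count '*'
decreasing_by
  · exact pvCount_replaceFirst_lt l '0' h (by decide)
  · exact pvCount_replaceFirst_lt l '1' h (by decide)

-- the k bits of mask, most significant first
def pvBitsL : Nat → Nat → List Char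
  | 0, _ => []
  | j + 1, mask => (if (mask >>> j) &&& 1 = 1 then '1' else '0') :: pvBitsL j mask

theorem pvFillMask_eq (l : List Char) (mask : Nat) :
    pvFillMask l mask (l.count '*' - 1) = pvFill l (pvBitsL (l.count '*') mask) := by
  induction l generalizing mask with
  | nil => rfl
  | cons c t ih =>
    by_cases hc : c = '*'
    · subst hc
      simp [pvFillMask, pvFill, pvBitsL, ih mask]
    · simp [pvFillMask, pvFill, hc, ih mask]

theorem pvBitsL_low (k m : Nat) (hm : m < 2 ^ k) : pvBitsL (k + 1) m = '0' :: pvBitsL k m := by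
  have h : m >>> k = 0 := by
    rw [Nat.shiftRight_eq_div_pow]; exact Nat.div_eq_of_lt hm
  simp [pvBitsL, h]

theorem pvBit_add (k j m : Nat) (hj : j < k) : (2 ^ k + m) >>> j &&& 1 = m >>> j &&& 1 := by
  rw [Nat.shiftRight_eq_div_pow, Nat.shiftRight_eq_div_pow, Nat.and_one_is_mod,
    Nat.and_one_is_mod]
  obtain ⟨r, rfl⟩ : ∃ r, k = j + 1 + r := ⟨k - j - 1, by omega⟩
  have hk : 2 ^ (j + 1 + r) = 2 ^ j * (2 * 2 ^ r) := by
    rw [pow_add, pow_add]; ring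
  rw [hk, Nat.add_comm, Nat.add_mul_div_left _ _ (Nat.two_pow_pos j)]
  omega

theorem pvBitsL_high (k m : Nat) (hm : m < 2 ^ k) :
    pvBitsL (k + 1) (2 ^ k + m) = '1' :: pvBitsL k (2 ^ k + m) := by
  have h1 : (2 ^ k + m) >>> k &&& 1 = 1 := by
    rw [Nat.shiftRight_eq_div_pow, Nat.and_one_is_mod, Nat.add_comm,
      Nat.add_div_right _ (Nat.two_pow_pos k), Nat.div_eq_of_lt hm]
  simp [pvBitsL, h1]

theorem pvBitsL_shift (k w m : Nat) (hw : w ≤ k) : pvBitsL w (2 ^ k + m) = pvBitsL w m := by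
  induction w with
  | zero => rfl
  | succ j ih => rw [pvBitsL, pvBitsL, pvBit_add k j m (by omega), ih (by omega)]

theorem pvProds_eq (k : Nat) : pvProds k = (List.range (2 ^ k)).map (pvBitsL k) := by
  induction k with
  | zero => rfl
  | succ k ih =>
    rw [pvProds, ih, show 2 ^ (k + 1) = 2 ^ k + 2 ^ k by rw [pow_succ]; omega,
      List.range_add, List.map_append, List.map_map, List.map_map, List.map_map]
    congr 1
    · apply List.map_congr_left
      intro m hm
      rw [List.mem_range] at hm
      simp only [Function.comp_apply]
      rw [pvBitsL_low k m hm]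
    · apply List.map_congr_left
      intro m hm
      rw [List.mem_range] at hm
      simp only [Function.comp_apply]
      rw [pvBitsL_high k m hm, pvBitsL_shift k k m le_rfl]

theorem pvExpand_eq (l : List Char) :
    pvExpand l = (pvProds (l.count '*')).map (pvFill l) := by
  rw [pvExpand, pvProds_eq, List.map_map]
  apply List.map_congr_left
  intro m _
  simp only [Function.comp_apply]
  exact pvFillMask_eq l m

theorem pvProds_mem (k : Nat) (bs : List Char) (h : bs ∈ pvProds k) :
    bs.length = k ∧ ∀ b ∈ bs, b = '0' ∨ b = '1' := by
  induction k generalizing bs with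
  | zero => simp [pvProds] at h; simp [h]
  | succ k ih =>
    simp only [pvProds, List.mem_append, List.mem_map] at h
    rcases h with ⟨cs, hcs, rfl⟩ | ⟨cs, hcs, rfl⟩ <;> obtain ⟨hl, hall⟩ := ih cs hcs
    · exact ⟨by simp [hl], by
        intro b hb
        rcases List.mem_cons.mp hb with rfl | hb
        exacts [Or.inl rfl, hall b hb]⟩
    · exact ⟨by simp [hl], by
        intro b hb
        rcases List.mem_cons.mp hb with rfl | hb
        exacts [Or.inr rfl, hall b hb]⟩

-- the instantiation relation: c realises pattern char p
def pvRel (c p : Char) : Prop := if p = '*' then c = '0' ∨ c = '1' else c = p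

theorem pvFill_rel (l : List Char) (bs : List Char)
    (hlen : l.count '*' ≤ bs.length) (hb : ∀ b ∈ bs, b = '0' ∨ b = '1') :
    List.Forall₂ pvRel (pvFill l bs) l := by
  induction l generalizing bs with
  | nil => exact List.Forall₂.nil
  | cons c t ih =>
    by_cases hc : c = '*'
    · subst hc
      simp only [List.count_cons_self] at hlen
      match bs, hlen with
      | b :: bs', hlen =>
        refine List.Forall₂.cons ?_ (ih bs' (by simp at hlen ⊢; omega) (fun x hx => hb x (List.mem_cons_of_mem _ hx)))
        simp [pvRel, hb b (List.mem_cons_self ..)]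
    · have hcount : List.count '*' (c :: t) = List.count '*' t := by
        simp [List.count_cons]
        exact hc
      rw [show pvFill (c :: t) bs = c :: pvFill t bs by simp [pvFill, hc]]
      rw [hcount] at hlen
      exact List.Forall₂.cons (by simp [pvRel, hc]) (ih bs hlen hb)

-- transfer of the checker through the instantiation relation
theorem pvRel_eq_of_ne_star (c p : Char) (h : pvRel c p) (hp : p ≠ '*') : c = p := by
  unfold pvRel at h; rw [if_neg hp] at h; exact h

theorem pvRel_digit (c p : Char) (h : pvRel c p) (hd : pvDok p = true) :
    c = '0' ∨ c = '1' := by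
  unfold pvRel at h
  by_cases hp : p = '*'
  · rw [if_pos hp] at h; exact h
  · rw [if_neg hp] at h
    subst h
    simp [pvDok, hp] at hd
    exact hd

theorem pvRel_not_underscore (c p : Char) (h : pvRel c p) (hp : p ≠ '_') : c ≠ '_' := by
  unfold pvRel at h
  by_cases hs : p = '*'
  · rw [if_pos hs] at h; rcases h with rfl | rfl <;> decide
  · rw [if_neg hs] at h; rw [h]; exact hp

theorem pvRel_space (c p : Char) (h : pvRel c p) : pvIsSpace c = pvIsSpace p := by
  unfold pvRel at h
  by_cases hs : p = '*'
  · rw [if_pos hs] at h; subst hs; rcases h with rfl | rfl <;> decide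
  · rw [if_neg hs] at h; subst h; rfl

theorem pvDrop_rel (l' l : List Char) (h : List.Forall₂ pvRel l' l) :
    List.Forall₂ pvRel (l'.dropWhile pvIsSpace) (l.dropWhile pvIsSpace) := by
  induction h with
  | nil => exact List.Forall₂.nil
  | cons hcp htl ih =>
    rw [List.dropWhile_cons, List.dropWhile_cons, pvRel_space _ _ hcp]
    split
    · exact ih
    · exact List.Forall₂.cons hcp htl

theorem pvStrip_rel (l' l : List Char) (h : List.Forall₂ pvRel l' l) :
    List.Forall₂ pvRel (pvStrip l') (pvStrip l) :=
  List.rel_reverse (pvDrop_rel _ _ (List.rel_reverse (pvDrop_rel _ _ h)))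

theorem pvRun_some : ∀ (l l' : List Char) (acc : Int), pvRunOk l = true →
    List.Forall₂ pvRel l' l → (pvRun l' acc).isSome = true
  | [], _, acc, _, h => by cases h; simp [pvRun]
  | p :: ps, _, acc, hok, h => by
    cases h with
    | cons hcp htl =>
    rename_i c cs
    by_cases hu : p = '_'
    · subst hu
      have hc : c = '_' := pvRel_eq_of_ne_star c '_' hcp (by decide)
      subst hc
      revert hok
      cases htl with
      | nil => intro hok; simp [pvRunOk] at hok
      | cons hcp' htl' =>
        rename_i c' p' cs' ps'
        intro hok
        rw [pvRunOk.eq_def] at hok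
        simp at hok
        obtain ⟨hd, hrest⟩ := hok
        rcases pvRel_digit c' p' hcp' hd with rfl | rfl <;>
          (rw [pvRun.eq_def]; simp [pvDval]; exact pvRun_some ps' cs' _ hrest htl')
    · have hc : c ≠ '_' := pvRel_not_underscore c p hcp hu
      rw [pvRunOk.eq_def] at hok
      simp [hu] at hok
      obtain ⟨hd, hrest⟩ := hok
      rcases pvRel_digit c p hcp hd with rfl | rfl <;>
        (rw [pvRun.eq_def]; simp [pvDval]; exact pvRun_some ps cs _ hrest htl)

theorem pvDigits_some (l l' : List Char) (hok : pvDigitsOk l = true)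
    (h : List.Forall₂ pvRel l' l) : (pvDigits l').isSome = true := by
  cases h with
  | nil => simp [pvDigitsOk] at hok
  | cons hcp htl =>
    rename_i c p cs ps
    simp [pvDigitsOk] at hok
    obtain ⟨hd, hrest⟩ := hok
    rcases pvRel_digit c p hcp hd with rfl | rfl <;>
      simpa [pvDigits, pvDval] using pvRun_some ps cs _ hrest htl

theorem pvBodyPref_some (l l' : List Char) (hok : pvBodyPrefOk l = true)
    (h : List.Forall₂ pvRel l' l) : (pvBodyPref l').isSome = true := by
  cases h with
  | nil => simp [pvBodyPrefOk] at hok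
  | cons hcp htl =>
    rename_i c p cs ps
    by_cases hu : p = '_'
    · subst hu
      have hc : c = '_' := pvRel_eq_of_ne_star c '_' hcp (by decide)
      subst hc
      simp only [pvBodyPrefOk, if_pos rfl] at hok
      simpa [pvBodyPref] using pvDigits_some ps cs hok htl
    · have hc : c ≠ '_' := pvRel_not_underscore c p hcp hu
      simp only [pvBodyPrefOk, if_neg hu] at hok
      simpa [pvBodyPref, hc] using pvDigits_some (p :: ps) (c :: cs) hok (List.Forall₂.cons hcp htl)

theorem pvBody_some (l l' : List Char) (hok : pvBodyOk l = true)
    (h : List.Forall₂ pvRel l' l) : (pvBody l').isSome = true := by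
  cases h with
  | nil => simp [pvBodyOk, pvDigitsOk] at hok
  | cons hcp htl =>
    rename_i c p cs ps
    cases htl with
    | nil =>
      -- one-char pattern: both sides take the digits fallback
      simp only [pvBodyOk] at hok
      simpa [pvBody] using pvDigits_some [p] [c] hok (List.Forall₂.cons hcp List.Forall₂.nil)
    | cons hcp' htl' =>
      rename_i d q ds qs
      by_cases hpref : p = '0' ∧ (q = 'b' ∨ q = 'B')
      · obtain ⟨rfl, hq⟩ := hpref
        have hc : c = '0' := pvRel_eq_of_ne_star c '0' hcp (by decide)
        have hdq : d = q := pvRel_eq_of_ne_star d q hcp'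
          (by rcases hq with rfl | rfl <;> decide)
        subst hc; subst hdq
        rcases hq with rfl | rfl <;>
        · simp [pvBodyOk] at hok
          simpa [pvBody] using pvBodyPref_some qs ds hok htl'
      · rw [show pvBodyOk (p :: q :: qs) = pvDigitsOk (p :: q :: qs) by
          simp [pvBodyOk, hpref]] at hok
        have hcd : ¬ (c = '0' ∧ (d = 'b' ∨ d = 'B')) := by
          rintro ⟨rfl, hd⟩
          have hq : q = 'b' ∨ q = 'B' := by
            by_cases hs : q = '*'
            · subst hs
              unfold pvRel at hcp'
              rw [if_pos rfl] at hcp'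
              rcases hcp' with rfl | rfl <;> rcases hd with h | h <;> exact absurd h (by decide)
            · rw [← pvRel_eq_of_ne_star d q hcp' hs]
              exact hd
          -- then pvDigitsOk (p :: q :: qs) forces pvDok q, impossible
          obtain ⟨-, hrun⟩ := (by simpa [pvDigitsOk] using hok : (pvDok p = true) ∧ pvRunOk (q :: qs) = true)
          rw [pvRunOk.eq_def] at hrun
          rcases hq with rfl | rfl <;> simp [pvDok] at hrun
        simpa [pvBody, hcd] using
          pvDigits_some (p :: q :: qs) (c :: d :: ds) hok
            (List.Forall₂.cons hcp (List.Forall₂.cons hcp' htl'))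

theorem pvSigned_some (l l' : List Char) (hok : pvSignedOk l = true)
    (h : List.Forall₂ pvRel l' l) : (pvSigned l').isSome = true := by
  cases h with
  | nil => simp [pvSignedOk, pvBodyOk, pvDigitsOk] at hok
  | cons hcp htl =>
    rename_i c p cs ps
    by_cases hplus : p = '+'
    · subst hplus
      have hc : c = '+' := pvRel_eq_of_ne_star c '+' hcp (by decide)
      subst hc
      simp [pvSignedOk] at hok
      simpa [pvSigned] using pvBody_some ps cs hok htl
    · by_cases hminus : p = '-'
      · subst hminus
        have hc : c = '-' := pvRel_eq_of_ne_star c '-' hcp (by decide)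
        subst hc
        simp [pvSignedOk] at hok
        simpa [pvSigned, Option.isSome_map] using pvBody_some ps cs hok htl
      · have hc1 : c ≠ '+' := by
          unfold pvRel at hcp
          by_cases hs : p = '*'
          · rw [if_pos hs] at hcp; rcases hcp with rfl | rfl <;> decide
          · rw [if_neg hs] at hcp; rw [hcp]; exact hplus
        have hc2 : c ≠ '-' := by
          unfold pvRel at hcp
          by_cases hs : p = '*'
          · rw [if_pos hs] at hcp; rcases hcp with rfl | rfl <;> decide
          · rw [if_neg hs] at hcp; rw [hcp]; exact hminus
        simp [pvSignedOk, hplus, hminus] at hok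
        simpa [pvSigned, hc1, hc2] using
          pvBody_some (p :: ps) (c :: cs) hok (List.Forall₂.cons hcp htl)

theorem pvInt2_some (l' l : List Char) (hok : pvSignedOk (pvStrip l) = true)
    (h : List.Forall₂ pvRel l' l) : (pvInt2 l').isSome = true :=
  pvSigned_some _ _ hok (pvStrip_rel _ _ h)

-- search equivalence
theorem pvInnerA_eq (m : Int) (Ns : List (List Char))
    (h : ∀ N ∈ Ns, (pvInt2 N).isSome = true) :
    pvInnerA m Ns = some (pvAnyDiv m (Ns.map pvInt2)) := by
  induction Ns with
  | nil => rfl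
  | cons N rest ih =>
    obtain ⟨n, hn⟩ := Option.isSome_iff_exists.mp (h N (List.mem_cons_self ..))
    by_cases hcond : ¬ n = 0 ∧ PySem.Int.mod m n = 0
    · simp [pvInnerA, pvAnyDiv, hn, hcond]
    · simp [pvInnerA, pvAnyDiv, hn, hcond, ih (fun x hx => h x (List.mem_cons_of_mem _ hx))]

theorem pvSearch_eq (Ms Ns : List (List Char))
    (hM : ∀ M ∈ Ms, (pvInt2 M).isSome = true) (hN : ∀ N ∈ Ns, (pvInt2 N).isSome = true) :
    pvSearchA Ms Ns = pvSearchB Ms (Ns.map pvInt2) := by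
  induction Ms with
  | nil => rfl
  | cons M rest ih =>
    obtain ⟨m, hm⟩ := Option.isSome_iff_exists.mp (hM M (List.mem_cons_self ..))
    simp only [pvSearchA, pvSearchB, hm, pvInnerA_eq m Ns hN]
    by_cases hd : pvAnyDiv m (Ns.map pvInt2) = true <;>
      simp [hd, ih (fun x hx => hM x (List.mem_cons_of_mem _ hx))]

theorem pvCombos_some (l : List Char) (hok : pvSignedOk (pvStrip l) = true)
    (x : List Char) (hx : x ∈ (pvProds (l.count '*')).map (pvFill l)) :
    (pvInt2 x).isSome = true := by
  obtain ⟨bs, hbs, rfl⟩ := List.mem_map.mp hx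
  obtain ⟨hlen, hall⟩ := pvProds_mem _ _ hbs
  exact pvInt2_some _ l hok (pvFill_rel l bs (by omega) hall)

-- ===== VERDICT (by name: the statement is the Claim_ definition above) =====
theorem find_valid_message_spec : Claim_equal_find_valid_message := by
  intro M N _ hPre
  obtain ⟨hM, hN⟩ := hPre
  unfold Spec_find_valid_message find_valid_message find_valid_message_alt
  rw [generate_combinations_eq, generate_combinations_eq, pvExpand_eq, pvExpand_eq]
  exact pvSearch_eq _ _ (pvCombos_some _ hM) (pvCombos_some _ hN)
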